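-- pv_equiv track=rewrite | github.com/elchacal801/sentinel | backend/services/products/target_packages.py | _identify_defensive_gaps
-- ===== SOURCE A (Python) =====
-- from typing import Dict, Any, List, Optional
--
-- def _identify_defensive_gaps(
--
--     asset: Dict[str, Any],
--     existing_controls: List[str]
-- ) -> List[str]:
--     """Identify defensive gaps"""
--     gaps = []
--
--     if "internet-facing" in asset.get("tags", []) and not any("firewall" in c.lower() for c in existing_controls):
--         gaps.append("No perimeter firewall detected")
--
--     if not any("monitoring" in c.lower() for c in existing_controls):
--         gaps.append("No active monitoring detected")
--
--     if not any("logging" in c.lower() for c in existing_controls):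
--         gaps.append("Logging not enabled")
--
--     if not any("mfa" in c.lower() or "2fa" in c.lower() for c in existing_controls):
--         gaps.append("No multi-factor authentication")
--
--     return gaps
-- ===== SOURCE B (Python) =====
-- def _identify_defensive_gaps(asset, existing_controls):
--     """Identify defensive gaps"""
--     has_firewall = has_monitoring = has_logging = has_mfa = False
--     for c in existing_controls:
--         lc = c.lower()
--         has_firewall = has_firewall or "firewall" in lc
--         has_monitoring = has_monitoring or "monitoring" in lc
--         has_logging = has_logging or "logging" in lc
--         has_mfa = has_mfa or "mfa" in lc or "2fa" in lc
--     gaps = []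
--     if "internet-facing" in asset.get("tags", []) and not has_firewall:
--         gaps.append("No perimeter firewall detected")
--     if not has_monitoring:
--         gaps.append("No active monitoring detected")
--     if not has_logging:
--         gaps.append("Logging not enabled")
--     if not has_mfa:
--         gaps.append("No multi-factor authentication")
--     return gaps
-- ===== Notes on version B (the rewrite author's own statement) =====
-- stated objective: alternative
-- what changed: Replaces four separate any()-scans (each lowercasing every control again) with one pass that lowercases each control once and OR-accumulates four boolean flags, then emits the gap list from the flags.
import Mathlib
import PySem

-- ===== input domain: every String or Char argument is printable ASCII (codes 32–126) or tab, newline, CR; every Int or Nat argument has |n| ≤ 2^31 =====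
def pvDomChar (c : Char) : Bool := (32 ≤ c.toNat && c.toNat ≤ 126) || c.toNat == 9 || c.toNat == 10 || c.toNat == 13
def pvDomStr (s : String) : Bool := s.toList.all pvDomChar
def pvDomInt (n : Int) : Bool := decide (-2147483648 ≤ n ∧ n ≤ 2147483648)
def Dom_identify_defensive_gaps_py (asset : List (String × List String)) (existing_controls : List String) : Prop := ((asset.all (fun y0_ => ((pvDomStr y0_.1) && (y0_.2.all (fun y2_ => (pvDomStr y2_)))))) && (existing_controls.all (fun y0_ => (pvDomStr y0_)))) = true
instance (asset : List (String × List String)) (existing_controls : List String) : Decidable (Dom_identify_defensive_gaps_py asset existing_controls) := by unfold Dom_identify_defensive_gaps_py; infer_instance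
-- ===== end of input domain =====

-- B replaces four any()-scans over existing_controls by one flag-collecting pass, then emits the gaps from the flags.
-- ===== PORT A =====
def identify_defensive_gaps_py (asset : List (String × List String)) (existing_controls : List String) : List String :=
  let gaps : List String := []
  let gaps := if ((PySem.Dict.ofList asset).getD "tags" []).contains "internet-facing"
                && !(existing_controls.any (fun c => PySem.Str.isIn "firewall" (PySem.Str.lower c))) then
      gaps ++ ["No perimeter firewall detected"] else gaps
  let gaps := if !(existing_controls.any (fun c => PySem.Str.isIn "monitoring" (PySem.Str.lower c))) then
      gaps ++ ["No active monitoring detected"] else gaps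
  let gaps := if !(existing_controls.any (fun c => PySem.Str.isIn "logging" (PySem.Str.lower c))) then
      gaps ++ ["Logging not enabled"] else gaps
  let gaps := if !(existing_controls.any (fun c => PySem.Str.isIn "mfa" (PySem.Str.lower c)
                      || PySem.Str.isIn "2fa" (PySem.Str.lower c))) then
      gaps ++ ["No multi-factor authentication"] else gaps
  gaps

-- ===== PORT B =====
def identify_defensive_gaps_py_alt (asset : List (String × List String)) (existing_controls : List String) : List String :=
  let flags := existing_controls.foldl
    (fun (f : Bool × Bool × Bool × Bool) c =>
      let lc := PySem.Str.lower c
      (f.1 || PySem.Str.isIn "firewall" lc,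
       f.2.1 || PySem.Str.isIn "monitoring" lc,
       f.2.2.1 || PySem.Str.isIn "logging" lc,
       f.2.2.2 || PySem.Str.isIn "mfa" lc || PySem.Str.isIn "2fa" lc))
    (false, false, false, false)
  (if ((PySem.Dict.ofList asset).getD "tags" []).contains "internet-facing" && !flags.1 then
      ["No perimeter firewall detected"] else [])
  ++ (if !flags.2.1 then ["No active monitoring detected"] else [])
  ++ (if !flags.2.2.1 then ["Logging not enabled"] else [])
  ++ (if !flags.2.2.2 then ["No multi-factor authentication"] else [])

-- ===== PRECONDITION & SPEC =====
def Spec_identify_defensive_gaps_py (asset : List (String × List String)) (existing_controls : List String) (out : List String) : Prop := out = identify_defensive_gaps_py_alt asset existing_controls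
instance (asset : List (String × List String)) (existing_controls : List String) (out : List String) : Decidable (Spec_identify_defensive_gaps_py asset existing_controls out) := by unfold Spec_identify_defensive_gaps_py; infer_instance

-- ===== CLAIM (what is proved, stated in full; the proofs are below) =====
def Claim_equal_identify_defensive_gaps_py : Prop := ∀ (asset : List (String × List String)) (existing_controls : List String), Dom_identify_defensive_gaps_py asset existing_controls → Spec_identify_defensive_gaps_py asset existing_controls (identify_defensive_gaps_py asset existing_controls)

-- ===== LEMMAS AND PROOFS =====

-- ===== VERDICT (by name: the statement is the Claim_ definition above) =====
-- the flag-collecting fold computes exactly the four any()-scans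
theorem flags_fold_eq (ec : List String) (f : Bool × Bool × Bool × Bool) :
    ec.foldl
      (fun (f : Bool × Bool × Bool × Bool) c =>
        let lc := PySem.Str.lower c
        (f.1 || PySem.Str.isIn "firewall" lc,
         f.2.1 || PySem.Str.isIn "monitoring" lc,
         f.2.2.1 || PySem.Str.isIn "logging" lc,
         f.2.2.2 || PySem.Str.isIn "mfa" lc || PySem.Str.isIn "2fa" lc)) f
    = (f.1 || ec.any (fun c => PySem.Str.isIn "firewall" (PySem.Str.lower c)),
       f.2.1 || ec.any (fun c => PySem.Str.isIn "monitoring" (PySem.Str.lower c)),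
       f.2.2.1 || ec.any (fun c => PySem.Str.isIn "logging" (PySem.Str.lower c)),
       f.2.2.2 || ec.any (fun c => PySem.Str.isIn "mfa" (PySem.Str.lower c)
                    || PySem.Str.isIn "2fa" (PySem.Str.lower c))) := by
  induction ec generalizing f with
  | nil => simp
  | cons c rest ih =>
    simp only [List.foldl_cons, List.any_cons, ih]
    simp [Bool.or_assoc]

theorem identify_defensive_gaps_py_spec : Claim_equal_identify_defensive_gaps_py := by
  intro asset ec _
  show identify_defensive_gaps_py asset ec = identify_defensive_gaps_py_alt asset ec
  unfold identify_defensive_gaps_py identify_defensive_gaps_py_alt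
  rw [flags_fold_eq]
  simp only [Bool.false_or]
  split_ifs <;> simp_all
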